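-- pv_equiv track=rewrite | github.com/EngindalgaMaku/akillirehber | backend/app/services/chunker.py | _get_overlap_sentences
-- ===== SOURCE A (Python) =====
-- from typing import Any, Dict, List, Optional, Tuple
--
-- def _get_overlap_sentences(sentences: List[str], overlap: int) -> List[str]:
--     """Get sentences from the end that fit within overlap size.
--
--     Always returns complete sentences, never partial.
--     """
--     if not sentences or overlap <= 0:
--         return []
--
--     result = []
--     total_length = 0
--
--     # Work backwards through sentences
--     for sentence in reversed(sentences):
--         sentence_len = len(sentence) + (1 if result else 0)  # +1 for space
--
--         if total_length + sentence_len <= overlap: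
--             result.insert(0, sentence)
--             total_length += sentence_len
--         elif not result:
--             # If even one sentence is too long, take it anyway
--             # but this shouldn't happen with proper sentence splitting
--             result.insert(0, sentence)
--             break
--         else:
--             break
--
--     return result
-- ===== SOURCE B (Python) =====
-- def _get_overlap_sentences(sentences, overlap):
--     """Get sentences from the end that fit within overlap size.
--
--     Always returns complete sentences, never partial.
--     """
--     if not sentences or overlap <= 0:
--         return []
--
--     # table[k-1] = joined length of the last k sentences: sum of lengths + (k-1) spaces
--     table = []
--     run = -1
--     for s in reversed(sentences):
--         run += len(s) + 1
--         table.append(run)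
--
--     # largest k whose suffix fits; stop at the first k that overflows
--     best = 0
--     while best < len(table) and table[best] <= overlap:
--         best += 1
--
--     if best == 0:
--         # even the single last sentence is too long: take it anyway
--         return sentences[-1:]
--     return sentences[len(sentences) - best:]
-- ===== Notes on version B (the rewrite author's own statement) =====
-- stated objective: faster
-- what changed: Replaces A's greedy backward loop that inserts sentences one by one at the front of the result with a three-step decomposition: build a cumulative suffix-length table, pick the largest k whose joined suffix fits the overlap budget, and return the suffix by a single slice (sentences[-1:] as fallback when even the last sentence overflows).
import Mathlib
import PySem

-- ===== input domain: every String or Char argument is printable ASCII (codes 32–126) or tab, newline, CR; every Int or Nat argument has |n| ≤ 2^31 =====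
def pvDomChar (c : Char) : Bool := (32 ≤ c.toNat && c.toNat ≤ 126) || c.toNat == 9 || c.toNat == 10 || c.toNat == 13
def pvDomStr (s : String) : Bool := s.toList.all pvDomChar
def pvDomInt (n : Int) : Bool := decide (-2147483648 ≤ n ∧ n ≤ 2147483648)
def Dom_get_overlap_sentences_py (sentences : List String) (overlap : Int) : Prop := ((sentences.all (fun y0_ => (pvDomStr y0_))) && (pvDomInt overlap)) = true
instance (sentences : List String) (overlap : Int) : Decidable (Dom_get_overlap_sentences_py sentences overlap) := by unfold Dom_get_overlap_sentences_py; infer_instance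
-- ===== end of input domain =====

-- B replaces A's greedy backward insert-accumulation with: build a cumulative suffix-length
-- table, pick the largest fitting k, return the suffix by one slice (objective: alternative).

-- ===== PORT A =====
-- A's backward loop with break: state (result, total_length); 'result.insert(0, s)' = 's :: result'.
def goA_get_overlap_sentences_py (overlap : Int) : List String → List String → Int → List String
  | [], result, _ => result
  | s :: rest, result, total =>
    let slen : Int := PySem.Str.len s + (if result ≠ [] then 1 else 0)
    if total + slen ≤ overlap then
      goA_get_overlap_sentences_py overlap rest (s :: result) (total + slen)
    else if result = [] then
      s :: result          -- take it anyway, then break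
    else
      result               -- break

def get_overlap_sentences_py (sentences : List String) (overlap : Int) : List String :=
  if sentences = [] ∨ overlap ≤ 0 then []
  else goA_get_overlap_sentences_py overlap sentences.reverse [] 0

-- ===== PORT B =====
-- table builder: 'run += len(s) + 1' for s in reversed(sentences), appending each running total
def tableB_get_overlap_sentences_py : List String → Int → List Int
  | [], _ => []
  | s :: rest, run =>
    let r := run + PySem.Str.len s + 1
    r :: tableB_get_overlap_sentences_py rest r

-- 'while best < len(table) and table[best] <= overlap: best += 1'
def bestB_get_overlap_sentences_py (overlap : Int) : List Int → Nat
  | [] => 0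
  | t :: rest => if t ≤ overlap then bestB_get_overlap_sentences_py overlap rest + 1 else 0

def get_overlap_sentences_py_alt (sentences : List String) (overlap : Int) : List String :=
  if sentences = [] ∨ overlap ≤ 0 then []
  else
    let table := tableB_get_overlap_sentences_py sentences.reverse (-1)
    let best := bestB_get_overlap_sentences_py overlap table
    if best = 0 then PySem.List.slice sentences (some (-1)) none            -- sentences[-1:]
    else PySem.List.slice sentences (some ((sentences.length : Int) - best)) none

-- ===== PRECONDITION & SPEC =====
def Spec_get_overlap_sentences_py (sentences : List String) (overlap : Int) (out : List String) : Prop := out = get_overlap_sentences_py_alt sentences overlap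
instance (sentences : List String) (overlap : Int) (out : List String) : Decidable (Spec_get_overlap_sentences_py sentences overlap out) := by unfold Spec_get_overlap_sentences_py; infer_instance

-- ===== CLAIM (what is proved, stated in full; the proofs are below) =====
def Claim_equal_get_overlap_sentences_py : Prop := ∀ (sentences : List String) (overlap : Int), Dom_get_overlap_sentences_py sentences overlap → Spec_get_overlap_sentences_py sentences overlap (get_overlap_sentences_py sentences overlap)

-- ===== LEMMAS AND PROOFS =====

-- reversing a prefix of the reversed list is a suffix of the original
theorem pv_rev_take {α : Type} (l : List α) (p : Nat) (h : p ≤ l.length) :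
    (l.take p).reverse = l.reverse.drop (l.length - p) := by
  have h1 := List.rdrop_eq_reverse_drop_reverse (l := l) (n := l.length - p)
  simp only [List.rdrop] at h1
  rw [show l.length - (l.length - p) = p by omega] at h1
  rw [h1, List.reverse_reverse]

-- best never exceeds the table length
theorem bestB_le_len (overlap : Int) (l : List Int) :
    bestB_get_overlap_sentences_py overlap l ≤ l.length := by
  induction l with
  | nil => simp [bestB_get_overlap_sentences_py]
  | cons t rest ih =>
    simp only [bestB_get_overlap_sentences_py, List.length_cons]
    split <;> omega

theorem tableB_len (l : List String) (run : Int) :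
    (tableB_get_overlap_sentences_py l run).length = l.length := by
  induction l generalizing run with
  | nil => rfl
  | cons s rest ih => simp [tableB_get_overlap_sentences_py, ih]

-- main invariant: with a nonempty accumulator, A's loop takes exactly the greedy prefix B counts
theorem goA_eq_take (overlap : Int) (l : List String) :
    ∀ (res : List String) (tot : Int), res ≠ [] →
    goA_get_overlap_sentences_py overlap l res tot =
      (l.take (bestB_get_overlap_sentences_py overlap
        (tableB_get_overlap_sentences_py l tot))).reverse ++ res := by
  induction l with
  | nil =>
    intro res tot _
    simp [goA_get_overlap_sentences_py, tableB_get_overlap_sentences_py,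
      bestB_get_overlap_sentences_py]
  | cons s rest ih =>
    intro res tot hres
    simp only [goA_get_overlap_sentences_py, tableB_get_overlap_sentences_py,
      bestB_get_overlap_sentences_py, ne_eq, hres, not_false_eq_true, if_true]
    by_cases h : tot + (PySem.Str.len s + 1) ≤ overlap
    · rw [if_pos h, if_pos (by omega : tot + PySem.Str.len s + 1 ≤ overlap)]
      rw [ih (s :: res) (tot + (PySem.Str.len s + 1)) (by simp)]
      have harg : tot + (PySem.Str.len s + 1) = tot + PySem.Str.len s + 1 := by ring
      rw [harg]
      simp
    · rw [if_neg h, if_neg (by omega : ¬ tot + PySem.Str.len s + 1 ≤ overlap)]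
      simp

theorem pv_main : ∀ (sentences : List String) (overlap : Int), get_overlap_sentences_py sentences overlap = get_overlap_sentences_py_alt sentences overlap := by
  intro sentences overlap
  unfold get_overlap_sentences_py get_overlap_sentences_py_alt
  by_cases hz : sentences = [] ∨ overlap ≤ 0
  · simp [hz]
  · rw [if_neg hz, if_neg hz]
    push_neg at hz
    obtain ⟨hne, hov⟩ := hz
    obtain ⟨s, rest, hrev⟩ : ∃ s rest, sentences.reverse = s :: rest := by
      cases h : sentences.reverse with
      | nil => exact absurd (by simpa using congrArg List.reverse h) hne
      | cons s rest => exact ⟨s, rest, rfl⟩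
    rw [hrev]
    have hsent : sentences = (s :: rest).reverse := by
      rw [← hrev, List.reverse_reverse]
    have hlen : sentences.length = rest.length + 1 := by rw [hsent]; simp
    simp only [goA_get_overlap_sentences_py, tableB_get_overlap_sentences_py,
      bestB_get_overlap_sentences_py]
    have hrun : (-1 : Int) + PySem.Str.len s + 1 = PySem.Str.len s := by ring
    rw [hrun]
    by_cases h1 : PySem.Str.len s ≤ overlap
    · -- the last sentence fits: A greedily extends, B counts best = p + 1
      rw [if_pos (by simpa using h1), if_pos h1]
      rw [show (0:Int) + (PySem.Str.len s + if ([]:List String) ≠ [] then (1:Int) else 0) =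
        PySem.Str.len s by simp]
      rw [goA_eq_take overlap rest [s] (PySem.Str.len s) (by simp)]
      set p := bestB_get_overlap_sentences_py overlap
        (tableB_get_overlap_sentences_py rest (PySem.Str.len s)) with hp
      rw [if_neg (by omega : ¬ p + 1 = 0)]
      have hple : p ≤ rest.length := le_trans (bestB_le_len _ _) (le_of_eq (tableB_len _ _))
      have hcast : ((sentences.length : Int) - ((p + 1 : ℕ) : Int)) = ((rest.length - p : ℕ) : Int) := by
        rw [hlen]; push_cast; omega
      rw [show (((p : ℕ) + 1 : ℕ) : Int) = ((p + 1 : ℕ) : Int) from rfl] at *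
      rw [hcast, PySem.List.slice_from_natCast, hsent]
      simp only [List.reverse_cons]
      rw [List.drop_append_of_le_length (by simpa using hple)]
      congr 1
      rw [pv_rev_take rest p hple]
    · -- even the last sentence overflows: A takes it anyway, B returns sentences[-1:]
      rw [if_neg (by simpa using h1), if_neg h1]
      rw [PySem.List.slice_from_neg_one, hsent]
      simp

-- ===== VERDICT (by name: the statement is the Claim_ definition above) =====
theorem get_overlap_sentences_py_spec : Claim_equal_get_overlap_sentences_py :=
  fun sentences overlap _ => pv_main sentences overlap
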